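-- pv_equiv track=rewrite | github.com/puds09/estrutura-de-dados-UNB | Pilha e Fila/questao_5.py | abriuNoMeio
-- ===== SOURCE A (Python) =====
-- def abriuNoMeio(operacao):
--     dics = {'(':')', '[':']', '{':'}'}
--     operators = ['+', '-', '*', '/']
--     for i in range(len(operacao)):
--         if(operacao[i] in dics.values()):
--             return True
--         if(operacao[i] in operators):
--             return False
-- ===== SOURCE B (Python) =====
-- def abriuNoMeio(operacao):
--     closer_idx = next((i for i, c in enumerate(operacao) if c in ')]}'), None)
--     op_idx = next((i for i, c in enumerate(operacao) if c in '+-*/'), None)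
--     if closer_idx is None and op_idx is None:
--         return None
--     if op_idx is None:
--         return True
--     if closer_idx is None:
--         return False
--     return closer_idx < op_idx
-- ===== Notes on version B (the rewrite author's own statement) =====
-- stated objective: alternative
-- what changed: Instead of one early-exit scan deciding at the first relevant character, B computes the first index of a closing bracket and the first index of an operator as two separate landmarks and compares them (branching on which exists).
import Mathlib
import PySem

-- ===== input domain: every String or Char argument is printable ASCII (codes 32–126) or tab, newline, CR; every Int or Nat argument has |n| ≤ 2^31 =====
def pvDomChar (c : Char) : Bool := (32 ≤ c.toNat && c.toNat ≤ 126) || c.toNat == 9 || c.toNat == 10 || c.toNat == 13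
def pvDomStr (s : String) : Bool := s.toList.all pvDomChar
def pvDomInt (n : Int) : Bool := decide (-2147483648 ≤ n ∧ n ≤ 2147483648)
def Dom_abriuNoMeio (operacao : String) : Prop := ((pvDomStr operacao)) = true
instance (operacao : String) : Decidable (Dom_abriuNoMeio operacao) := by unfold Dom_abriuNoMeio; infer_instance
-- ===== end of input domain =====

-- B replaces A's single early-exit scan by two independent first-index landmarks compared after the fact; same cost (alternative).

-- ===== PORT A =====
-- A's loop: at each character in order, return True on a closing bracket, False on an operator; fall through to None.
def abriuNoMeioLoop : List Char → Option Bool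
  | [] => none
  | c :: rest =>
    if c = ')' ∨ c = ']' ∨ c = '}' then some true
    else if c = '+' ∨ c = '-' ∨ c = '*' ∨ c = '/' then some false
    else abriuNoMeioLoop rest

def abriuNoMeio (operacao : String) : Option Bool := abriuNoMeioLoop operacao.toList

-- ===== PORT B =====
def isCloserB (c : Char) : Bool := c = ')' || c = ']' || c = '}'
def isOpB (c : Char) : Bool := c = '+' || c = '-' || c = '*' || c = '/'

def abriuNoMeio_alt (operacao : String) : Option Bool :=
  match operacao.toList.findIdx? isCloserB, operacao.toList.findIdx? isOpB with
  | none, none => none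
  | some _, none => some true
  | none, some _ => some false
  | some i, some j => some (decide (i < j))

-- ===== PRECONDITION & SPEC =====
def Spec_abriuNoMeio (operacao : String) (out : Option Bool) : Prop := out = abriuNoMeio_alt operacao
instance (operacao : String) (out : Option Bool) : Decidable (Spec_abriuNoMeio operacao out) := by unfold Spec_abriuNoMeio; infer_instance

-- ===== CLAIM (what is proved, stated in full; the proofs are below) =====
def Claim_equal_abriuNoMeio : Prop := ∀ (operacao : String), Dom_abriuNoMeio operacao → Spec_abriuNoMeio operacao (abriuNoMeio operacao)

-- ===== LEMMAS AND PROOFS =====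
def altOnList (l : List Char) : Option Bool :=
  match l.findIdx? isCloserB, l.findIdx? isOpB with
  | none, none => none
  | some _, none => some true
  | none, some _ => some false
  | some i, some j => some (decide (i < j))

theorem loop_eq_alt (l : List Char) : abriuNoMeioLoop l = altOnList l := by
  induction l with
  | nil => rfl
  | cons c rest ih =>
    by_cases hc : c = ')' ∨ c = ']' ∨ c = '}'
    · have hcb : isCloserB c = true := by
        rcases hc with h | h | h <;> simp [isCloserB, h]
      have hob : isOpB c = false := by
        rcases hc with h | h | h <;> simp [isOpB, h]
      rw [show abriuNoMeioLoop (c :: rest) = some true from by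
        simp [abriuNoMeioLoop, hc]]
      unfold altOnList
      rw [List.findIdx?_cons, List.findIdx?_cons, hcb, hob]
      cases h : rest.findIdx? isOpB <;> simp
    · have hcb : isCloserB c = false := by
        simp only [isCloserB, Bool.or_eq_false_iff, decide_eq_false_iff_not]; tauto
      by_cases ho : c = '+' ∨ c = '-' ∨ c = '*' ∨ c = '/'
      · have hob : isOpB c = true := by
          rcases ho with h | h | h | h <;> simp [isOpB, h]
        rw [show abriuNoMeioLoop (c :: rest) = some false from by
          simp [abriuNoMeioLoop, hc, ho]]
        unfold altOnList
        rw [List.findIdx?_cons, List.findIdx?_cons, hcb, hob]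
        cases h : rest.findIdx? isCloserB <;> simp
      · have hob : isOpB c = false := by
          simp only [isOpB, Bool.or_eq_false_iff, decide_eq_false_iff_not]; tauto
        rw [show abriuNoMeioLoop (c :: rest) = abriuNoMeioLoop rest from by
          simp [abriuNoMeioLoop, hc, ho], ih]
        unfold altOnList
        rw [List.findIdx?_cons, List.findIdx?_cons, hcb, hob]
        cases h1 : rest.findIdx? isCloserB <;> cases h2 : rest.findIdx? isOpB <;> simp

-- ===== VERDICT (by name: the statement is the Claim_ definition above) =====
theorem abriuNoMeio_spec : Claim_equal_abriuNoMeio := by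
  intro s _
  unfold Spec_abriuNoMeio abriuNoMeio abriuNoMeio_alt
  rw [loop_eq_alt]
  rfl
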